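-- pv_equiv track=rewrite | github.com/pypi-data/pypi-mirror-384 | packages/dot-agent-kit/dot_agent_kit-0.1.11.tar.gz/dot_agent_kit-0.1.11/src/dot_agent/sync.py | _expand_managed_files
-- ===== SOURCE A (Python) =====
-- def _expand_managed_files(
--     managed_files: tuple[str, ...],
--     available_resources: set[str],
-- ) -> list[str]:
--     """Expand directory patterns in managed files to actual file paths."""
--     expanded: list[str] = []
--     for pattern in managed_files:
--         if pattern.endswith("/"):
--             # Directory pattern - expand to all matching files
--             prefix = pattern
--             for resource in sorted(available_resources):
--                 if resource.startswith(prefix):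
--                     expanded.append(resource)
--         else:
--             # Specific file path
--             expanded.append(pattern)
--     return expanded
-- ===== SOURCE B (Python) =====
-- def _bisect_left(a, x):
--     lo, hi = 0, len(a)
--     while lo < hi:
--         mid = (lo + hi) // 2
--         if a[mid] < x:
--             lo = mid + 1
--         else:
--             hi = mid
--     return lo
--
--
-- def _expand_managed_files(managed_files, available_resources):
--     """Expand directory patterns in managed files to actual file paths."""
--     sorted_res = sorted(available_resources)
--     expanded = []
--     for pattern in managed_files:
--         if pattern.endswith("/"):
--             # matches form a contiguous block of the sorted list: binary-search to it
--             i = _bisect_left(sorted_res, pattern)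
--             while i < len(sorted_res) and sorted_res[i].startswith(pattern):
--                 expanded.append(sorted_res[i])
--                 i += 1
--         else:
--             expanded.append(pattern)
--     return expanded
-- ===== Notes on version B (the rewrite author's own statement) =====
-- stated objective: alternative
-- what changed: Sort the resource set once up front (A re-sorts it inside the loop for every directory pattern) and replace each pattern's full scan of all resources by a hand-rolled binary search that jumps to the contiguous block of sorted resources sharing the prefix, emitting until the first non-match.
import Mathlib
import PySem

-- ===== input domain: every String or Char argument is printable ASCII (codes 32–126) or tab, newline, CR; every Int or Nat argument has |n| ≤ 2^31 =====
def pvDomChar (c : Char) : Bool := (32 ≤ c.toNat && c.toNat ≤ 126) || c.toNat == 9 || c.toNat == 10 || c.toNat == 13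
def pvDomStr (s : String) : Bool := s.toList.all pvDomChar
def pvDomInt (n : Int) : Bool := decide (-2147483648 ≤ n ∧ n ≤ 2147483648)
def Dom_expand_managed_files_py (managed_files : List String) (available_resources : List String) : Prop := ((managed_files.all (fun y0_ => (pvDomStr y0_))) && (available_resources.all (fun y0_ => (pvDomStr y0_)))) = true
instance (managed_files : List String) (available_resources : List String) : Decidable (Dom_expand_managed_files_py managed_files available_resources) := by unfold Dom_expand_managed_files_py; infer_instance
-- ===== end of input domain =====

-- B sorts the resource set once and binary-searches to each pattern's contiguous prefix block,
-- instead of A's per-pattern re-sort and full scan of all resources (objective: alternative).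


-- ===== PORT A =====
def expand_managed_files_py (managed_files : List String) (available_resources : List String) : List String :=
  managed_files.foldl (fun expanded pattern =>
    if PySem.Str.endswith pattern "/" then
      (PySem.List.sorted available_resources (fun r => r)).foldl
        (fun acc resource =>
          if PySem.Str.startswith resource pattern then acc ++ [resource] else acc) expanded
    else expanded ++ [pattern]) []

-- ===== PORT B =====
-- while lo < hi: mid = (lo+hi)//2; if a[mid] < x: lo = mid+1 else hi = mid   (fuel = initial hi-lo bound)
def bisectLoopStr (a : List String) (x : String) : Nat → Nat → Nat → Nat
  | 0, lo, _ => lo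
  | fuel+1, lo, hi =>
    if lo < hi then
      if a.getD ((lo + hi) / 2) "" < x then bisectLoopStr a x fuel ((lo + hi) / 2 + 1) hi
      else bisectLoopStr a x fuel lo ((lo + hi) / 2)
    else lo

def bisectLeftStr (a : List String) (x : String) : Nat :=
  bisectLoopStr a x a.length 0 a.length

-- while i < len(s) and s[i].startswith(pattern): expanded.append(s[i]); i += 1
def scanMatches (s : List String) (pattern : String) (i : Nat) (acc : List String) : List String :=
  if h : i < s.length then
    if PySem.Str.startswith s[i] pattern then
      scanMatches s pattern (i + 1) (acc ++ [s[i]])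
    else acc
  else acc
termination_by s.length - i

def expand_managed_files_py_alt (managed_files : List String) (available_resources : List String) : List String :=
  let sortedRes := PySem.List.sorted available_resources (fun r => r)
  managed_files.foldl (fun expanded pattern =>
    if PySem.Str.endswith pattern "/" then
      scanMatches sortedRes pattern (bisectLeftStr sortedRes pattern) expanded
    else expanded ++ [pattern]) []

-- ===== PRECONDITION & SPEC =====
def Spec_expand_managed_files_py (managed_files : List String) (available_resources : List String) (out : List String) : Prop := out = expand_managed_files_py_alt managed_files available_resources
instance (managed_files : List String) (available_resources : List String) (out : List String) : Decidable (Spec_expand_managed_files_py managed_files available_resources out) := by unfold Spec_expand_managed_files_py; infer_instance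

-- ===== CLAIM (what is proved, stated in full; the proofs are below) =====
def Claim_equal_expand_managed_files_py : Prop := ∀ (managed_files : List String) (available_resources : List String), Dom_expand_managed_files_py managed_files available_resources → Spec_expand_managed_files_py managed_files available_resources (expand_managed_files_py managed_files available_resources)

-- ===== LEMMAS AND PROOFS =====

theorem prefix_not_lt (p t : List Char) (hlt : p ++ t < p) : False := by
  induction p with
  | nil => cases hlt
  | cons a p ih => cases hlt with
    | cons h' => exact ih h'
    | rel h' => exact lt_irrefl _ h'

theorem lex_block (p x y : List Char) (hxp : ¬ x < p) (hnpre : ¬ p <+: x) (hpre : p <+: y) :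
    y < x := by
  induction p generalizing x y with
  | nil => exact absurd List.nil_prefix hnpre
  | cons a p ih =>
    cases x with
    | nil => exact absurd List.Lex.nil hxp
    | cons b x' =>
      obtain ⟨t, rfl⟩ := hpre
      rcases lt_trichotomy a b with h | h | h
      · exact List.Lex.rel h
      · subst h
        have hx'p : ¬ x' < p := fun hh => hxp (List.Lex.cons hh)
        have hnpre' : ¬ p <+: x' := fun hh => hnpre (List.cons_prefix_cons.mpr ⟨rfl, hh⟩)
        exact List.Lex.cons (ih x' (p ++ t) hx'p hnpre' ⟨t, rfl⟩)
      · exact absurd (List.Lex.rel h) hxp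

-- a string starting with p is ≥ p
theorem le_of_startswith (p r : String) (h : PySem.Str.startswith r p = true) : p ≤ r := by
  rw [PySem.Str.startswith_eq, PySem.Chars.startswith_iff] at h
  by_cases hlt : r < p
  · exfalso
    obtain ⟨t, ht⟩ := h
    apply prefix_not_lt p.toList t
    rw [ht]
    exact String.lt_iff_toList_lt.mp hlt
  · exact not_lt.mp hlt

-- once a string ≥ p fails to start with p, every later string fails too
theorem lt_of_startswith (p x y : String) (hpx : p ≤ x)
    (hx : PySem.Str.startswith x p = false) (hy : PySem.Str.startswith y p = true) : y < x := by
  rw [PySem.Str.startswith_eq] at hx hy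
  rw [PySem.Chars.startswith_iff] at hy
  have hnpre : ¬ p.toList <+: x.toList := by
    intro hh
    rw [← PySem.Chars.startswith_iff, hx] at hh; cases hh
  have hxp : ¬ x.toList < p.toList := fun hh => absurd (String.lt_iff_toList_lt.mpr hh) (not_lt.mpr hpx)
  exact String.lt_iff_toList_lt.mpr (lex_block _ _ _ hxp hnpre hy)

theorem bisectLoopStr_spec (s : List String) (x : String) (hs : s.Pairwise (· ≤ ·)) :
    ∀ (fuel lo hi : Nat), lo ≤ hi → hi ≤ s.length → hi - lo ≤ fuel →
    (∀ j (hj : j < s.length), j < lo → s[j] < x) →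
    (∀ j (hj : j < s.length), hi ≤ j → x ≤ s[j]) →
    (∀ j (hj : j < s.length), j < bisectLoopStr s x fuel lo hi → s[j] < x) ∧
    (∀ j (hj : j < s.length), bisectLoopStr s x fuel lo hi ≤ j → x ≤ s[j]) := by
  intro fuel
  induction fuel with
  | zero =>
    intro lo hi hlh hhl hf hlow hhigh
    have : lo = hi := by omega
    subst this
    exact ⟨fun j hj hjl => hlow j hj hjl, fun j hj hjl => hhigh j hj hjl⟩
  | succ fuel ih =>
    intro lo hi hlh hhl hf hlow hhigh
    by_cases hcmp : lo < hi
    · have hmid : (lo + hi) / 2 < s.length := by omega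
      rw [bisectLoopStr, if_pos hcmp]
      have hget : s.getD ((lo + hi) / 2) "" = s[(lo + hi) / 2] := List.getD_eq_getElem s "" hmid
      have hmono : ∀ i j (hi' : i < s.length) (hj : j < s.length), i ≤ j → s[i] ≤ s[j] := by
        intro i j hi' hj hij
        rcases eq_or_lt_of_le hij with rfl | hlt
        · exact le_refl _
        · exact List.pairwise_iff_getElem.mp hs i j hi' hj hlt
      by_cases hv : s.getD ((lo + hi) / 2) "" < x
      · rw [if_pos hv]
        refine ih ((lo + hi) / 2 + 1) hi (by omega) hhl (by omega) ?_ hhigh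
        intro j hj hjl
        have : s[j] ≤ s[(lo + hi) / 2] := hmono j _ hj hmid (by omega)
        exact lt_of_le_of_lt this (hget ▸ hv)
      · rw [if_neg hv]
        refine ih lo ((lo + hi) / 2) (by omega) (by omega) (by omega) hlow ?_
        intro j hj hjl
        have : s[(lo + hi) / 2] ≤ s[j] := hmono _ j hmid hj (by omega)
        exact le_trans (not_lt.mp (hget ▸ hv)) this
    · rw [bisectLoopStr, if_neg hcmp]
      have : lo = hi := by omega
      subst this
      exact ⟨fun j hj hjl => hlow j hj hjl, fun j hj hjl => hhigh j hj hjl⟩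

theorem bisectLeftStr_spec (s : List String) (x : String) (hs : s.Pairwise (· ≤ ·)) :
    (∀ j (hj : j < s.length), j < bisectLeftStr s x → s[j] < x) ∧
    (∀ j (hj : j < s.length), bisectLeftStr s x ≤ j → x ≤ s[j]) :=
  bisectLoopStr_spec s x hs s.length 0 s.length (Nat.zero_le _) le_rfl (by omega)
    (fun j _ h => absurd h (Nat.not_lt_zero j)) (fun j hj h => absurd hj (by omega))

theorem scanMatches_eq (s : List String) (p : String) :
    ∀ i acc, scanMatches s p i acc
      = acc ++ (s.drop i).takeWhile (fun r => PySem.Str.startswith r p) := by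
  intro i
  induction hn : s.length - i using Nat.strong_induction_on generalizing i with
  | _ n ihn =>
    intro acc
    rw [scanMatches]
    by_cases h : i < s.length
    · rw [dif_pos h, List.drop_eq_getElem_cons h]
      by_cases hq : PySem.Str.startswith s[i] p = true
      · rw [if_pos hq, ihn (s.length - (i+1)) (by omega) (i+1) rfl]
        simp only [List.takeWhile_cons, hq, if_true, List.append_assoc, List.singleton_append]
      · rw [if_neg hq]
        have hq' : PySem.Str.startswith s[i] p = false := Bool.eq_false_iff.mpr hq
        rw [PySem.Str.startswith_eq] at hq'
        simp [hq']
    · rw [dif_neg h, List.drop_eq_nil_of_le (by omega), List.takeWhile_nil, List.append_nil]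

theorem filter_eq_takeWhile_of_sorted (p : String) :
    ∀ (t : List String), t.Pairwise (· ≤ ·) → (∀ x ∈ t, p ≤ x) →
      t.filter (fun r => PySem.Str.startswith r p)
        = t.takeWhile (fun r => PySem.Str.startswith r p) := by
  intro t
  induction t with
  | nil => intro _ _; rfl
  | cons a t ih =>
    intro hp hge
    rw [List.pairwise_cons] at hp
    by_cases hq : PySem.Str.startswith a p = true
    · simp only [List.filter_cons, List.takeWhile_cons, hq, if_true]
      rw [ih hp.2 (fun x hx => hge x (List.mem_cons_of_mem a hx))]
    · have hnil : t.filter (fun r => PySem.Str.startswith r p) = [] := by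
        rw [List.filter_eq_nil_iff]
        intro y hy
        simp only [Bool.not_eq_true]
        by_contra hyq
        rw [Bool.not_eq_false] at hyq
        have hya : y < a := lt_of_startswith p a y (hge a List.mem_cons_self)
          (Bool.eq_false_iff.mpr hq) hyq
        exact absurd (hp.1 y hy) (not_le.mpr hya)
      have hq' : PySem.Chars.startswith a.toList p.toList = false := by
        rw [← PySem.Str.startswith_eq]
        exact Bool.eq_false_iff.mpr hq
      have hnil' : List.filter (fun r => PySem.Chars.startswith r.toList p.toList) t = [] := by
        rw [← hnil]
        simp [PySem.Str.startswith_eq]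
      simp [hq', hnil']

theorem block_eq (s : List String) (p : String) (hs : s.Pairwise (· ≤ ·)) :
    (s.drop (bisectLeftStr s p)).takeWhile (fun r => PySem.Str.startswith r p)
      = s.filter (fun r => PySem.Str.startswith r p) := by
  obtain ⟨hlow, hhigh⟩ := bisectLeftStr_spec s p hs
  set k := bisectLeftStr s p with hk
  have hsplit : s = s.take k ++ s.drop k := (List.take_append_drop k s).symm
  have hfront : (s.take k).filter (fun r => PySem.Str.startswith r p) = [] := by
    rw [List.filter_eq_nil_iff]
    intro x hx
    obtain ⟨j, hj, hjx⟩ := List.mem_iff_getElem.mp hx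
    have hjk : j < k := by
      have := hj; rw [List.length_take] at this; omega
    have hjs : j < s.length := by
      have := hj; rw [List.length_take] at this; omega
    have hxj : x = s[j] := by rw [← hjx, List.getElem_take]
    simp only [Bool.not_eq_true]
    by_contra hxq
    rw [Bool.not_eq_false] at hxq
    exact absurd (le_of_startswith p x hxq) (not_le.mpr (hxj ▸ hlow j hjs hjk))
  have hback : (s.drop k).filter (fun r => PySem.Str.startswith r p)
      = (s.drop k).takeWhile (fun r => PySem.Str.startswith r p) := by
    refine filter_eq_takeWhile_of_sorted p (s.drop k) (hs.sublist (List.drop_sublist k s)) ?_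
    intro x hx
    obtain ⟨j, hj, hjx⟩ := List.mem_iff_getElem.mp hx
    have hjs : k + j < s.length := by
      have := hj; rw [List.length_drop] at this; omega
    have hxj : x = s[k + j] := by rw [← hjx, List.getElem_drop]
    exact hxj ▸ hhigh (k + j) hjs (by omega)
  conv_rhs => rw [hsplit]
  rw [List.filter_append, hfront, List.nil_append, hback]

theorem step_eq (available_resources : List String) (pattern : String)
    (expanded : List String) :
    (if PySem.Str.endswith pattern "/" then
      (PySem.List.sorted available_resources (fun r => r)).foldl
        (fun acc resource =>
          if PySem.Str.startswith resource pattern then acc ++ [resource] else acc) expanded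
    else expanded ++ [pattern])
    = (if PySem.Str.endswith pattern "/" then
        scanMatches (PySem.List.sorted available_resources (fun r => r)) pattern
          (bisectLeftStr (PySem.List.sorted available_resources (fun r => r)) pattern) expanded
      else expanded ++ [pattern]) := by
  by_cases he : PySem.Str.endswith pattern "/" = true
  · rw [if_pos he, if_pos he]
    have hs : (PySem.List.sorted available_resources (fun r => r)).Pairwise (· ≤ ·) :=
      PySem.List.sorted_pairwise available_resources (fun r => r)
    rw [PySem.List.foldl_append_if_eq_filter, scanMatches_eq, block_eq _ _ hs]
  · rw [if_neg he, if_neg he]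

theorem foldl_eq (available_resources : List String) :
    ∀ (mf : List String) (acc : List String),
    mf.foldl (fun expanded pattern =>
      if PySem.Str.endswith pattern "/" then
        (PySem.List.sorted available_resources (fun r => r)).foldl
          (fun acc resource =>
            if PySem.Str.startswith resource pattern then acc ++ [resource] else acc) expanded
      else expanded ++ [pattern]) acc
    = mf.foldl (fun expanded pattern =>
      if PySem.Str.endswith pattern "/" then
        scanMatches (PySem.List.sorted available_resources (fun r => r)) pattern
          (bisectLeftStr (PySem.List.sorted available_resources (fun r => r)) pattern) expanded
      else expanded ++ [pattern]) acc := by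
  intro mf
  induction mf with
  | nil => intro acc; rfl
  | cons p mf ih =>
    intro acc
    rw [List.foldl_cons, List.foldl_cons, step_eq, ih]

-- ===== VERDICT (by name: the statement is the Claim_ definition above) =====
theorem expand_managed_files_py_spec : Claim_equal_expand_managed_files_py := by
  intro managed_files available_resources _
  unfold Spec_expand_managed_files_py expand_managed_files_py expand_managed_files_py_alt
  exact foldl_eq available_resources managed_files []
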